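-- pv_equiv track=rewrite | github.com/luyang-huang96/GraphAugmentedSum | data/batcher.py | create_word_freq_in_para_feat
-- ===== SOURCE A (Python) =====
-- MAX_FREQ = 100
--
-- def create_word_freq_in_para_feat(paras, tokenized_sents, tokenized_article):
--     sent_align_para = []
--     last_idx = 0
--     for sent in range(len(tokenized_sents)):
--         flag = False
--         for _idx, para in enumerate(paras):
--             if sent in para:
--                 sent_align_para.append(_idx)
--                 last_idx = _idx
--                 flag = True
--                 break
--         if not flag:
--             sent_align_para.append(last_idx)
--     word_count = {}
--     for word in tokenized_article:
--         try:
--             word_count[word] += 1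
--         except KeyError:
--             word_count[word] = 1
--     word_inpara_count = {}
--     for word in list(set(tokenized_article)):
--         count = 0
--         for sent in tokenized_sents:
--             if word in sent:
--                 count += 1
--         word_inpara_count[word] = count
--
--     # sent_freq_feat = [[word_count[word] for word in sent] for sent in tokenized_sents]
--     article_freq_feat = [word_count[word] if word_count[word] < MAX_FREQ-1 else MAX_FREQ-1 for word in tokenized_article]
--     article_inpara_freq_feat = [word_inpara_count[word] if word_inpara_count[word] < MAX_FREQ-1 else MAX_FREQ-1 for word in tokenized_article]
--     sent_freq_feat = [[word_count[word] if word_count[word] < MAX_FREQ-1 else MAX_FREQ-1 for word in sent] for sent in tokenized_sents]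
--     sent_inpara_freq_feat = [[word_inpara_count[word] if word_inpara_count[word] < MAX_FREQ-1 else MAX_FREQ-1 for word in sent] for sent in tokenized_sents]
--
--     return article_freq_feat, article_inpara_freq_feat, sent_freq_feat, sent_inpara_freq_feat
-- ===== SOURCE B (Python) =====
-- MAX_FREQ = 100
--
-- def create_word_freq_in_para_feat(paras, tokenized_sents, tokenized_article):
--     # single pass: count words once, and count sentence-occurrences by
--     # iterating sentences (deduped per sentence) instead of scanning every
--     # sentence for every distinct article word.
--     cap = MAX_FREQ - 1
--     word_count = {}
--     for w in tokenized_article: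
--         word_count[w] = word_count.get(w, 0) + 1
--     inpara = {}
--     for sent in tokenized_sents:
--         for w in set(sent):
--             inpara[w] = inpara.get(w, 0) + 1
--     article_freq_feat = [min(word_count[w], cap) for w in tokenized_article]
--     article_inpara_freq_feat = [min(inpara.get(w, 0), cap) for w in tokenized_article]
--     sent_freq_feat = [[min(word_count[w], cap) for w in s] for s in tokenized_sents]
--     sent_inpara_freq_feat = [[min(inpara[w], cap) for w in s] for s in tokenized_sents]
--     return article_freq_feat, article_inpara_freq_feat, sent_freq_feat, sent_inpara_freq_feat
-- ===== Notes on version B (the rewrite author's own statement) =====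
-- stated objective: faster
-- what changed: B replaces A's per-distinct-word scan of all sentences (and A's dead sent_align_para loop) by one pass over the sentences incrementing a per-word sentence-occurrence counter for each deduped sentence, and uses min() for capping.
import Mathlib
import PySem

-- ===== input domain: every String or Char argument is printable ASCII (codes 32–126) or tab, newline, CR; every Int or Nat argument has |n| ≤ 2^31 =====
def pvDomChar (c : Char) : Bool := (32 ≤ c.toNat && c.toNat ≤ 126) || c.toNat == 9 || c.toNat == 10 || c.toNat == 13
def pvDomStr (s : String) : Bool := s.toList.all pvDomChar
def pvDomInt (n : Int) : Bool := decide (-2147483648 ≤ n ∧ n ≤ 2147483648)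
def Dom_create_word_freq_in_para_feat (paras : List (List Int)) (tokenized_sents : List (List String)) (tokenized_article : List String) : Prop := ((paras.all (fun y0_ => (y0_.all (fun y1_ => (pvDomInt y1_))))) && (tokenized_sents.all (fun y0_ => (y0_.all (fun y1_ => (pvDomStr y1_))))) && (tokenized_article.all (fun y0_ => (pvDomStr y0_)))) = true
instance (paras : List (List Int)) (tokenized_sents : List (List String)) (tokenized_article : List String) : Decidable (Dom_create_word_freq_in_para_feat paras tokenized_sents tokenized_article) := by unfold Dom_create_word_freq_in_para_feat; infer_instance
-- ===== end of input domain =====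

-- B replaces A's per-distinct-word scan of all sentences (and A's dead sent_align_para loop)
-- by one pass over the sentences incrementing a sentence-occurrence counter per deduped sentence; objective: faster.

-- ===== PORT A =====
def create_word_freq_in_para_feat (paras : List (List Int)) (tokenized_sents : List (List String)) (tokenized_article : List String) : List Int × List Int × List (List Int) × List (List Int) :=
  -- sent_align_para / last_idx: computed by A but never used in its return value; kept for faithfulness
  let _sent_align_para : List Int × Int :=
    (PySem.List.pyRange 0 (Int.ofNat tokenized_sents.length) 1).foldl
      (fun (st : List Int × Int) sent =>
        match (PySem.List.enumerate paras).find? (fun p => decide (sent ∈ p.2)) with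
        | some p => (st.1 ++ [p.1], p.1)
        | none => (st.1 ++ [st.2], st.2)) ([], 0)
  let word_count : PySem.Dict String Int :=
    tokenized_article.foldl
      (fun d w => match d.get? w with    -- try: d[w] += 1 / except KeyError: d[w] = 1
        | some v => d.insert w (v + 1)
        | none => d.insert w 1) PySem.Dict.empty
  let word_inpara_count : PySem.Dict String Int :=
    (PySem.Set.ofList tokenized_article).foldl
      (fun d w => d.insert w
        (tokenized_sents.foldl (fun c s => if w ∈ s then c + 1 else c) (0 : Int)))
      PySem.Dict.empty
  -- dict lookups d[w] raise KeyError when missing: Pre_ excludes those inputs; getD 0 is used as the total form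
  let article_freq_feat := tokenized_article.map (fun w =>
    let c := word_count.getD w 0; if c < 100 - 1 then c else 100 - 1)
  let article_inpara_freq_feat := tokenized_article.map (fun w =>
    let c := word_inpara_count.getD w 0; if c < 100 - 1 then c else 100 - 1)
  let sent_freq_feat := tokenized_sents.map (fun s => s.map (fun w =>
    let c := word_count.getD w 0; if c < 100 - 1 then c else 100 - 1))
  let sent_inpara_freq_feat := tokenized_sents.map (fun s => s.map (fun w =>
    let c := word_inpara_count.getD w 0; if c < 100 - 1 then c else 100 - 1))
  (article_freq_feat, article_inpara_freq_feat, sent_freq_feat, sent_inpara_freq_feat)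

-- ===== PORT B =====
def create_word_freq_in_para_feat_alt (paras : List (List Int)) (tokenized_sents : List (List String)) (tokenized_article : List String) : List Int × List Int × List (List Int) × List (List Int) :=
  let cap : Int := 100 - 1
  let word_count : PySem.Dict String Int :=
    tokenized_article.foldl (fun d w => d.insert w (d.getD w 0 + 1)) PySem.Dict.empty
  let inpara : PySem.Dict String Int :=
    tokenized_sents.foldl
      (fun d s => (PySem.Set.ofList s).foldl (fun d w => d.insert w (d.getD w 0 + 1)) d)
      PySem.Dict.empty
  let article_freq_feat := tokenized_article.map (fun w => min (word_count.getD w 0) cap)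
  let article_inpara_freq_feat := tokenized_article.map (fun w => min (inpara.getD w 0) cap)
  let sent_freq_feat := tokenized_sents.map (fun s => s.map (fun w => min (word_count.getD w 0) cap))
  let sent_inpara_freq_feat := tokenized_sents.map (fun s => s.map (fun w => min (inpara.getD w 0) cap))
  (article_freq_feat, article_inpara_freq_feat, sent_freq_feat, sent_inpara_freq_feat)

-- ===== PRECONDITION & SPEC =====
-- Pre_ excludes exactly the inputs where A raises KeyError: a sentence token absent from tokenized_article.
def Pre_create_word_freq_in_para_feat (paras : List (List Int)) (tokenized_sents : List (List String)) (tokenized_article : List String) : Prop :=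
  ∀ s ∈ tokenized_sents, ∀ w ∈ s, w ∈ tokenized_article
instance (paras : List (List Int)) (tokenized_sents : List (List String)) (tokenized_article : List String) : Decidable (Pre_create_word_freq_in_para_feat paras tokenized_sents tokenized_article) := by unfold Pre_create_word_freq_in_para_feat; infer_instance

def pvWitness_create_word_freq_in_para_feat : List (List Int) × List (List String) × List String :=
  ([[0], [1, 2]], [["a", "b"], ["b"]], ["a", "b", "a", "c"])

def Spec_create_word_freq_in_para_feat (paras : List (List Int)) (tokenized_sents : List (List String)) (tokenized_article : List String) (out : List Int × List Int × List (List Int) × List (List Int)) : Prop := out = create_word_freq_in_para_feat_alt paras tokenized_sents tokenized_article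
instance (paras : List (List Int)) (tokenized_sents : List (List String)) (tokenized_article : List String) (out : List Int × List Int × List (List Int) × List (List Int)) : Decidable (Spec_create_word_freq_in_para_feat paras tokenized_sents tokenized_article out) := by unfold Spec_create_word_freq_in_para_feat; infer_instance

-- ===== CLAIM (what is proved, stated in full; the proofs are below) =====
def Claim_equal_create_word_freq_in_para_feat : Prop := ∀ (paras : List (List Int)) (tokenized_sents : List (List String)) (tokenized_article : List String), Dom_create_word_freq_in_para_feat paras tokenized_sents tokenized_article → Pre_create_word_freq_in_para_feat paras tokenized_sents tokenized_article → Spec_create_word_freq_in_para_feat paras tokenized_sents tokenized_article (create_word_freq_in_para_feat paras tokenized_sents tokenized_article)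

-- ===== LEMMAS AND PROOFS =====

-- A's try/except counting loop equals B's get-based counting loop
theorem wc_step_eq (art : List String) :
    art.foldl (fun (d : PySem.Dict String Int) w => match d.get? w with
        | some v => d.insert w (v + 1)
        | none => d.insert w 1) PySem.Dict.empty
    = art.foldl (fun d w => d.insert w (d.getD w 0 + 1)) PySem.Dict.empty := by
  apply PySem.List.foldl_congr_mem
  intro d w _
  cases h : d.get? w <;> simp [PySem.Dict.getD_eq_get?_getD, h]

-- lookup in a fold of inserts whose value depends only on the key
theorem getD_foldl_insert_fn (f : String → Int) (l : List String) (d : PySem.Dict String Int) (w : String) :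
    (l.foldl (fun d k => d.insert k (f k)) d).getD w 0
      = if w ∈ l then f w else d.getD w 0 := by
  induction l generalizing d with
  | nil => simp
  | cons x rest ih =>
    simp only [List.foldl_cons, ih, PySem.Dict.getD_insert, List.mem_cons]
    by_cases h1 : w ∈ rest <;> by_cases h2 : w = x <;> simp [h1, h2]

-- B's sentence-occurrence counter reads back the number of sentences containing w
theorem getD_inpara (sents : List (List String)) (d : PySem.Dict String Int) (w : String) :
    (sents.foldl (fun d s => (PySem.Set.ofList s).foldl (fun d w => d.insert w (d.getD w 0 + 1)) d) d).getD w 0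
      = d.getD w 0 + (sents.countP (fun s => decide (w ∈ s)) : Int) := by
  induction sents generalizing d with
  | nil => simp
  | cons s rest ih =>
    simp only [List.foldl_cons, ih, PySem.Dict.getD_foldl_insert_add_one, List.countP_cons]
    have hcnt : ((PySem.Set.ofList s).count w : Int) = if w ∈ s then 1 else 0 := by
      by_cases h : w ∈ s
      · rw [List.count_eq_one_of_mem (PySem.Set.nodup_ofList s) ((PySem.Set.mem_ofList _ _).mpr h)]
        simp [h]
      · rw [List.count_eq_zero.mpr (fun hm => h ((PySem.Set.mem_ofList _ _).mp hm))]
        simp [h]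
    rw [hcnt]
    by_cases h : w ∈ s <;> simp [h, add_comm, add_assoc, add_left_comm]

theorem cap_eq (c : Int) : (if c < 100 - 1 then c else 100 - 1) = min c (100 - 1) := by
  rw [min_def]; split_ifs <;> omega

-- ===== VERDICT (by name: the statement is the Claim_ definition above) =====
theorem create_word_freq_in_para_feat_spec : Claim_equal_create_word_freq_in_para_feat := by
  unfold Claim_equal_create_word_freq_in_para_feat
  intro paras sents art _ hpre
  unfold Spec_create_word_freq_in_para_feat
  unfold create_word_freq_in_para_feat create_word_freq_in_para_feat_alt
  simp only [wc_step_eq]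
  have hw : ∀ w ∈ art,
      ((PySem.Set.ofList art).foldl
        (fun (d : PySem.Dict String Int) w => d.insert w
          (sents.foldl (fun c s => if w ∈ s then c + 1 else c) (0 : Int)))
        PySem.Dict.empty).getD w 0
      = (sents.foldl (fun d s => (PySem.Set.ofList s).foldl (fun d w => d.insert w (d.getD w 0 + 1)) d) PySem.Dict.empty).getD w 0 := by
    intro w hwmem
    rw [getD_foldl_insert_fn, getD_inpara]
    simp [(PySem.Set.mem_ofList _ _).mpr hwmem, PySem.List.foldl_ite_add_one]
  refine Prod.ext ?_ (Prod.ext ?_ (Prod.ext ?_ ?_)) <;> simp only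
  · exact List.map_congr_left (fun w _ => cap_eq _)
  · exact List.map_congr_left (fun w hwm => by rw [cap_eq, hw w hwm])
  · exact List.map_congr_left (fun s _ => List.map_congr_left (fun w _ => cap_eq _))
  · exact List.map_congr_left (fun s hs => List.map_congr_left
      (fun w hwm => by rw [cap_eq, hw w (hpre s hs w hwm)]))
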